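-- pv_equiv track=rewrite | github.com/AVK111/ScamTrap_Hackathon | scamtrap-backend/app/agents/risk_agent.py | _find_repeated_phrases
-- ===== SOURCE A (Python) =====
-- def _find_repeated_phrases(texts: list) -> int:
--     """Count how many times key phrases are repeated"""
--
--     key_phrases = [
--         "verify", "confirm", "urgent", "immediately", "account",
--         "blocked", "suspended", "click", "link", "payment"
--     ]
--
--     repeated_count = 0
--     for phrase in key_phrases:
--         count = sum(1 for text in texts if phrase in text)
--         if count >= 2:
--             repeated_count += 1
--
--     return repeated_count
-- ===== SOURCE B (Python) =====
-- def _find_repeated_phrases(texts: list) -> int: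
--     """Count how many times key phrases are repeated"""
--
--     key_phrases = [
--         "verify", "confirm", "urgent", "immediately", "account",
--         "blocked", "suspended", "click", "link", "payment"
--     ]
--
--     # Bit-set accumulation: each text contributes a 10-bit mask of the phrases
--     # it contains; two saturating bitmasks track "seen in >=1 text" and
--     # "seen in >=2 texts"; the answer is the popcount of the second mask.
--     seen_once = 0
--     seen_twice = 0
--     for text in texts:
--         mask = 0
--         bit = 1
--         for phrase in key_phrases:
--             if phrase in text:
--                 mask |= bit
--             bit <<= 1
--         seen_twice |= seen_once & mask
--         seen_once |= mask
--
--     count = 0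
--     while seen_twice:
--         count += seen_twice & 1
--         seen_twice >>= 1
--     return count
-- ===== Notes on version B (the rewrite author's own statement) =====
-- stated objective: alternative
-- what changed: Replaces per-phrase counting over repeated scans of the text list with a single pass that encodes each text's phrase hits as a 10-bit mask and saturates two bitmasks (seen-once, seen-twice) via bitwise AND/OR, returning the popcount of the seen-twice mask.
import Mathlib
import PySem

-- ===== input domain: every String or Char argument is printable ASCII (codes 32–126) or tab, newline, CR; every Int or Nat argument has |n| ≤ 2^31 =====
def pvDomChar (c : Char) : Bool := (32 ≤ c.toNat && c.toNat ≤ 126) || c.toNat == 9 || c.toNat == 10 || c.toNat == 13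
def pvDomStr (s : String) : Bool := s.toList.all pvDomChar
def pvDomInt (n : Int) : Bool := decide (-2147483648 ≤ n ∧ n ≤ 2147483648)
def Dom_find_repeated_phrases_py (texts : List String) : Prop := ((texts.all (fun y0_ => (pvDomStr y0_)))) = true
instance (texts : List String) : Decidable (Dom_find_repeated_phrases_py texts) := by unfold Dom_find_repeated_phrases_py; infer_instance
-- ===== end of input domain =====

-- B replaces A's per-phrase counters over repeated scans of the texts by a single pass
-- that records each text's phrase hits as a bitmask and saturates two bitmasks
-- (seen-once / seen-twice), returning the popcount of the seen-twice mask (alternative).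

def pvKeyPhrases : List String :=
  ["verify", "confirm", "urgent", "immediately", "account",
   "blocked", "suspended", "click", "link", "payment"]

-- ===== PORT A =====
def find_repeated_phrases_py (texts : List String) : Int :=
  pvKeyPhrases.foldl (fun repeated_count phrase =>
    let count : Int :=
      ((texts.filter (fun text => PySem.Str.isIn phrase text)).map (fun _ => (1 : Int))).sum
    if count ≥ 2 then repeated_count + 1 else repeated_count) 0

-- ===== PORT B =====
-- the trailing `while seen_twice: count += seen_twice & 1; seen_twice >>= 1` loop of Source B
def pvPopcountAux (x count : Nat) : Nat :=
  if h : x = 0 then count else pvPopcountAux (x >>> 1) (count + (x &&& 1))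
decreasing_by
  rw [Nat.shiftRight_one]
  exact Nat.div_lt_self (Nat.pos_of_ne_zero h) one_lt_two

def find_repeated_phrases_py_alt (texts : List String) : Int :=
  let st : Nat × Nat :=
    texts.foldl (fun st text =>
      let mb : Nat × Nat :=
        pvKeyPhrases.foldl (fun mb phrase =>
          (if PySem.Str.isIn phrase text then mb.1 ||| mb.2 else mb.1, mb.2 <<< 1)) (0, 1)
      (st.1 ||| mb.1, st.2 ||| (st.1 &&& mb.1))) (0, 0)
  ((pvPopcountAux st.2 0 : Nat) : Int)

-- ===== PRECONDITION & SPEC =====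
def Spec_find_repeated_phrases_py (texts : List String) (out : Int) : Prop := out = find_repeated_phrases_py_alt texts
instance (texts : List String) (out : Int) : Decidable (Spec_find_repeated_phrases_py texts out) := by unfold Spec_find_repeated_phrases_py; infer_instance

-- ===== CLAIM (what is proved, stated in full; the proofs are below) =====
def Claim_equal_find_repeated_phrases_py : Prop := ∀ (texts : List String), Dom_find_repeated_phrases_py texts → Spec_find_repeated_phrases_py texts (find_repeated_phrases_py texts)

-- ===== LEMMAS AND PROOFS =====

-- whether the j-th key phrase occurs in text t (false for j ≥ 10)
def pvContB (t : String) (j : Nat) : Bool :=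
  (pvKeyPhrases[j]?).elim false (fun p => PySem.Str.isIn p t)

-- number of texts of ts containing the j-th key phrase
def pvCnt (ts : List String) (j : Nat) : Nat := ts.countP (fun t => pvContB t j)

-- the inner mask-building fold, bit by bit (generalized over start mask m and start bit 2^k)
lemma pv_mask_bit (L : List String) (t : String) (m k j : Nat) :
    ((L.foldl (fun mb phrase =>
        (if PySem.Str.isIn phrase t then mb.1 ||| mb.2 else mb.1, mb.2 <<< 1)) (m, 2 ^ k)).1).testBit j
      = (m.testBit j || (decide (k ≤ j) && (L[j - k]?).elim false (fun p => PySem.Str.isIn p t))) := by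
  induction L generalizing m k with
  | nil => simp
  | cons p L ih =>
    have h2 : (2 ^ k) <<< 1 = 2 ^ (k + 1) := by
      rw [Nat.shiftLeft_eq]; ring
    have hm' : ∀ j', ((if PySem.Str.isIn p t then m ||| 2 ^ k else m).testBit j')
        = (m.testBit j' || (PySem.Str.isIn p t && decide (k = j'))) := by
      intro j'
      by_cases hp : PySem.Chars.isIn p.toList t.toList <;>
        simp [PySem.Str.isIn, hp, Nat.testBit_two_pow]
    have hstep : ((p :: L).foldl (fun mb phrase =>
        (if PySem.Str.isIn phrase t then mb.1 ||| mb.2 else mb.1, mb.2 <<< 1)) (m, 2 ^ k))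
        = (L.foldl (fun mb phrase =>
        (if PySem.Str.isIn phrase t then mb.1 ||| mb.2 else mb.1, mb.2 <<< 1))
          ((if PySem.Str.isIn p t then m ||| 2 ^ k else m), 2 ^ (k + 1))) := by
      simp only [List.foldl_cons, h2]
    rw [hstep, ih, hm']
    rcases lt_trichotomy j k with h | h | h
    · have e1 : ¬ k ≤ j := by omega
      have e2 : ¬ k + 1 ≤ j := by omega
      have e3 : ¬ k = j := by omega
      simp [e1, e2, e3]
    · subst h
      have e2 : ¬ j + 1 ≤ j := by omega
      simp [e2]
    · have e1 : k ≤ j := by omega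
      have e2 : k + 1 ≤ j := by omega
      have e3 : ¬ k = j := by omega
      have hj : j - k = (j - (k + 1)) + 1 := by omega
      rw [hj]
      simp [e1, e2, e3]

-- the outer fold: bit j of seen_once says "phrase j in ≥1 text so far",
-- bit j of seen_twice says "phrase j in ≥2 texts so far" (saturating, relative to the start state)
lemma pv_outer_bits (ts : List String) (o tw : Nat) (j : Nat) :
    ((ts.foldl (fun st text =>
        let mb : Nat × Nat :=
          pvKeyPhrases.foldl (fun mb phrase =>
            (if PySem.Str.isIn phrase text then mb.1 ||| mb.2 else mb.1, mb.2 <<< 1)) (0, 1)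
        (st.1 ||| mb.1, st.2 ||| (st.1 &&& mb.1))) (o, tw)).1.testBit j
      = (o.testBit j || decide (1 ≤ pvCnt ts j)))
  ∧ ((ts.foldl (fun st text =>
        let mb : Nat × Nat :=
          pvKeyPhrases.foldl (fun mb phrase =>
            (if PySem.Str.isIn phrase text then mb.1 ||| mb.2 else mb.1, mb.2 <<< 1)) (0, 1)
        (st.1 ||| mb.1, st.2 ||| (st.1 &&& mb.1))) (o, tw)).2.testBit j
      = (tw.testBit j || (o.testBit j && decide (1 ≤ pvCnt ts j)) || decide (2 ≤ pvCnt ts j))) := by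
  induction ts generalizing o tw with
  | nil => simp [pvCnt]
  | cons t ts ih =>
    simp only [List.foldl_cons]
    have hmask : ((pvKeyPhrases.foldl (fun mb phrase =>
        (if PySem.Str.isIn phrase t then mb.1 ||| mb.2 else mb.1, mb.2 <<< 1)) (0, 1)).1).testBit j
        = pvContB t j := by
      have := pv_mask_bit pvKeyPhrases t 0 0 j
      simpa [pvContB] using this
    obtain ⟨ih1, ih2⟩ := ih (o ||| _) (tw ||| _)
    rw [ih1, ih2]
    have hcnt : pvCnt (t :: ts) j = (if pvContB t j then 1 else 0) + pvCnt ts j := by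
      simp only [pvCnt, List.countP_cons]
      rcases Bool.eq_false_or_eq_true (pvContB t j) with h | h <;> simp only [h] <;> omega

    constructor
    · rw [Nat.testBit_lor, hmask, hcnt]
      cases h : pvContB t j
      · simp
      · have h1 : 1 ≤ 1 + pvCnt ts j := by omega
        cases o.testBit j <;> simp [h1]
    · rw [Nat.testBit_lor, Nat.testBit_lor, Nat.testBit_land, hmask, hcnt]
      cases h : pvContB t j
      · simp
      · have h0 : 1 ≤ 1 + pvCnt ts j := by omega
        cases ho : o.testBit j <;> cases htw : tw.testBit j <;>
          by_cases h1 : 2 ≤ 1 + pvCnt ts j <;>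
            simp_all <;> omega

-- the popcount loop counts the set bits below any bound k above which all bits are clear
lemma pv_popcount (k : Nat) : ∀ (x c : Nat), (∀ i, k ≤ i → x.testBit i = false) →
    pvPopcountAux x c = c + (List.range k).countP x.testBit := by
  induction k with
  | zero =>
    intro x c hb
    have hx : x = 0 := Nat.zero_of_testBit_eq_false (fun i => hb i (Nat.zero_le i))
    subst hx
    rw [pvPopcountAux]
    simp
  | succ k ih =>
    intro x c hb
    by_cases hx : x = 0
    · subst hx
      rw [pvPopcountAux]
      simp
    · rw [pvPopcountAux]
      simp only [hx, dif_neg, not_false_iff]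
      rw [Nat.shiftRight_one, Nat.and_one_is_mod]
      rw [ih (x / 2) (c + x % 2) (fun i hi => by
        rw [← Nat.testBit_succ]
        exact hb (i + 1) (by omega))]
      have hshift : ((List.range k).countP (x.testBit ∘ Nat.succ)) = (List.range k).countP (x / 2).testBit := by
        apply List.countP_congr
        intro i _
        simp [Function.comp, Nat.testBit_succ]
      have hr : (List.range (k + 1)).countP x.testBit
          = (if x.testBit 0 then 1 else 0) + (List.range k).countP (x / 2).testBit := by
        rw [List.range_succ_eq_map, List.countP_cons, List.countP_map, hshift]
        exact Nat.add_comm _ _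
      have hbit0 : (if x.testBit 0 then 1 else 0) = x % 2 := by
        rcases Nat.mod_two_eq_zero_or_one x with h | h <;> simp [Nat.testBit_zero, h]
      rw [hr, hbit0]
      omega

-- A's per-phrase accumulation counts the phrases satisfying the ≥ 2 test
lemma pv_foldl_countP (L : List String) (f : String → Int) (acc : Int) :
    L.foldl (fun rc p => if 2 ≤ f p then rc + 1 else rc) acc
      = acc + ((L.countP (fun p => decide (2 ≤ f p))) : Int) := by
  induction L generalizing acc with
  | nil => simp
  | cons q L ih =>
    simp only [List.foldl_cons, List.countP_cons]
    rw [ih]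
    by_cases hq : 2 ≤ f q
    · simp [hq]; ring
    · simp [hq]

-- sum of 1 over a filtered list = countP
lemma pv_sum_ones (L : List String) (c : String → Bool) :
    ((L.filter c).map (fun _ => (1 : Int))).sum = ((L.countP c) : Int) := by
  rw [List.map_const', List.sum_replicate, List.countP_eq_length_filter]
  simp

-- the count over bit positions 0..9 equals the count over the phrase list itself
lemma pv_bridge (texts : List String) :
    (List.range 10).countP (fun j => decide (2 ≤ pvCnt texts j))
      = pvKeyPhrases.countP (fun p => decide (2 ≤ texts.countP (fun t => PySem.Str.isIn p t))) := by
  show (List.range 10).countP _ = _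
  simp only [List.range_succ, List.range_zero, List.countP_append, List.countP_cons,
    List.countP_nil, pvCnt, pvContB, pvKeyPhrases]
  norm_num
  omega

-- proof-side name for the seen-twice accumulator of B's single pass
def pvTW (texts : List String) : Nat :=
  (texts.foldl (fun st text =>
      let mb : Nat × Nat :=
        pvKeyPhrases.foldl (fun mb phrase =>
          (if PySem.Str.isIn phrase text then mb.1 ||| mb.2 else mb.1, mb.2 <<< 1)) (0, 1)
      (st.1 ||| mb.1, st.2 ||| (st.1 &&& mb.1))) (0, 0)).2

lemma pv_tw_bit (texts : List String) (j : Nat) :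
    (pvTW texts).testBit j = decide (2 ≤ pvCnt texts j) := by
  have h := (pv_outer_bits texts 0 0 j).2
  unfold pvTW
  rw [h]
  simp

lemma pv_tw_high (texts : List String) : ∀ i, 10 ≤ i → (pvTW texts).testBit i = false := by
  intro i hi
  rw [pv_tw_bit]
  have h0 : pvCnt texts i = 0 := by
    unfold pvCnt
    apply List.countP_eq_zero.mpr
    intro t _
    unfold pvContB
    have hn : pvKeyPhrases[i]? = none := by
      apply List.getElem?_eq_none
      simp only [pvKeyPhrases, List.length_cons, List.length_nil]
      omega
    simp [hn]
  simp [h0]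

lemma pv_alt_eq (texts : List String) :
    find_repeated_phrases_py_alt texts
      = ((pvKeyPhrases.countP (fun p => decide (2 ≤ texts.countP (fun t => PySem.Str.isIn p t)))) : Int) := by
  show ((pvPopcountAux (pvTW texts) 0 : Nat) : Int) = _
  rw [pv_popcount 10 (pvTW texts) 0 (pv_tw_high texts)]
  have hcc : (List.range 10).countP (pvTW texts).testBit
      = (List.range 10).countP (fun j => decide (2 ≤ pvCnt texts j)) :=
    List.countP_congr (fun j _ => by simp [pv_tw_bit texts j])
  rw [Nat.zero_add, hcc, pv_bridge texts]

lemma pv_a_eq (texts : List String) :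
    find_repeated_phrases_py texts
      = ((pvKeyPhrases.countP (fun p => decide (2 ≤ texts.countP (fun t => PySem.Str.isIn p t)))) : Int) := by
  unfold find_repeated_phrases_py
  simp only [ge_iff_le]
  rw [pv_foldl_countP]
  have hpp : pvKeyPhrases.countP (fun p =>
        decide (2 ≤ ((texts.filter (fun text => PySem.Str.isIn p text)).map (fun _ => (1 : Int))).sum))
      = pvKeyPhrases.countP (fun p => decide (2 ≤ texts.countP (fun t => PySem.Str.isIn p t))) :=
    List.countP_congr (fun p _ => by
      rw [pv_sum_ones texts (fun t => PySem.Str.isIn p t)]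
      norm_num)
  rw [hpp]
  simp

-- ===== VERDICT (by name: the statement is the Claim_ definition above) =====
theorem find_repeated_phrases_py_spec : Claim_equal_find_repeated_phrases_py := by
  intro texts _
  unfold Spec_find_repeated_phrases_py
  rw [pv_a_eq, pv_alt_eq]
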